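-- pv_equiv track=rewrite | github.com/filojiston/codewars-solutions | clean-up-after-your-dog.py | crap
-- ===== SOURCE A (Python) =====
-- def crap(garden, bags, cap):
--     garden = [item for row in garden for item in row]
--     if "D" in garden:
--         return "Dog!!"
--     elif garden.count("@") > bags * cap:
--         return "Cr@p"
--     else:
--         return "Clean"
-- ===== SOURCE B (Python) =====
-- def crap(garden, bags, cap):
--     def go(rows, budget):
--         if not rows:
--             return "Clean" if budget >= 0 else "Cr@p"
--         row = rows[0]
--         if "D" in row:
--             return "Dog!!"
--         return go(rows[1:], budget - row.count("@"))
--     return go(garden, bags * cap)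
-- ===== Notes on version B (the rewrite author's own statement) =====
-- stated objective: alternative
-- what changed: Replaces flatten + membership scan + full .count with a recursive row-by-row pass that early-terminates at the first row containing 'D' and tracks a decreasing budget bags*cap, deciding by the sign of the remainder.
import Mathlib
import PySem

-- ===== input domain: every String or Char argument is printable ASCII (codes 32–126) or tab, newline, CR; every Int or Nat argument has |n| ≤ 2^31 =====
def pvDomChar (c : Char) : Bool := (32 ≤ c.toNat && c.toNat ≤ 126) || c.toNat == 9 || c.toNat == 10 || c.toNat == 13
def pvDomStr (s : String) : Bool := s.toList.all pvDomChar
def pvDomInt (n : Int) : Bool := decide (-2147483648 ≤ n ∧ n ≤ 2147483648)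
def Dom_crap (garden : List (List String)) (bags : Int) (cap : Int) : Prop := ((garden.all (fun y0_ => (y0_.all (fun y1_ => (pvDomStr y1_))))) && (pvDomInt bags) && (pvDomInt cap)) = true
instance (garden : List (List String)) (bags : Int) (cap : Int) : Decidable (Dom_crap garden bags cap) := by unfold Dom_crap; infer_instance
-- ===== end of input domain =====

-- B replaces A's flatten + membership scan + .count with a recursive row-by-row pass that early-exits at the first row containing "D" and decrements a budget bags*cap (alternative decomposition, same cost).


-- ===== PORT A =====
def crap (garden : List (List String)) (bags : Int) (cap : Int) : String :=
  -- garden = [item for row in garden for item in row]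
  let flat : List String := garden.foldl (fun acc row => row.foldl (fun acc item => acc ++ [item]) acc) []
  if flat.contains "D" then "Dog!!"
  else if ((flat.count "@" : Int) > bags * cap) then "Cr@p"
  else "Clean"

-- ===== PORT B =====
-- inner recursive helper go(rows, budget) of Source B
def crapGo (rows : List (List String)) (budget : Int) : String :=
  match rows with
  | [] => if budget ≥ 0 then "Clean" else "Cr@p"
  | row :: rest =>
    if row.contains "D" then "Dog!!"
    else crapGo rest (budget - (row.count "@" : Int))

def crap_alt (garden : List (List String)) (bags : Int) (cap : Int) : String :=
  crapGo garden (bags * cap)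

-- ===== PRECONDITION & SPEC =====
def Spec_crap (garden : List (List String)) (bags : Int) (cap : Int) (out : String) : Prop := out = crap_alt garden bags cap
instance (garden : List (List String)) (bags : Int) (cap : Int) (out : String) : Decidable (Spec_crap garden bags cap out) := by unfold Spec_crap; infer_instance

-- ===== CLAIM =====
def Claim_equal_crap : Prop := ∀ (garden : List (List String)) (bags : Int) (cap : Int), Dom_crap garden bags cap → Spec_crap garden bags cap (crap garden bags cap)

-- ===== LEMMAS AND PROOFS =====

-- A's inner flatten fold over one row appends the row
theorem crap_flat_row (row acc : List String) :
    row.foldl (fun acc item => acc ++ [item]) acc = acc ++ row := by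
  induction row generalizing acc with
  | nil => simp
  | cons x xs ih => rw [List.foldl_cons, ih]; simp

-- A's comprehension fold produces the flattened garden
theorem crap_flat (garden : List (List String)) (acc : List String) :
    garden.foldl (fun acc row => row.foldl (fun acc item => acc ++ [item]) acc) acc
      = acc ++ garden.flatten := by
  induction garden generalizing acc with
  | nil => simp
  | cons r rs ih => rw [List.foldl_cons, ih, crap_flat_row]; simp

-- characterisation of B's recursion: early exit on "D", budget sign decides the rest
theorem crapGo_eq (rows : List (List String)) (budget : Int) :
    crapGo rows budget
      = (if rows.flatten.contains "D" then "Dog!!"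
         else if ((rows.flatten.count "@" : Int) > budget) then "Cr@p"
         else "Clean") := by
  induction rows generalizing budget with
  | nil =>
    simp only [crapGo, List.flatten_nil, List.contains_nil, List.count_nil, Nat.cast_zero,
      Bool.false_eq_true, if_false]
    by_cases h : budget ≥ 0
    · rw [if_pos h, if_neg (by omega)]
    · rw [if_neg h, if_pos (by omega)]
  | cons r rs ih =>
    simp only [crapGo]
    by_cases hD : r.contains "D" = true
    · have h : (r :: rs).flatten.contains "D" = true := by
        rw [List.flatten_cons, List.contains_append, hD, Bool.true_or]
      rw [if_pos hD, if_pos h]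
    · have hDf : r.contains "D" = false := by
        cases h : r.contains "D" with
        | false => rfl
        | true => exact absurd h hD
      have hDe : (r :: rs).flatten.contains "D" = rs.flatten.contains "D" := by
        rw [List.flatten_cons, List.contains_append, hDf, Bool.false_or]
      have hc : (((r :: rs).flatten).count "@" : Int)
          = (rs.flatten.count "@" : Int) + (r.count "@" : Int) := by
        rw [List.flatten_cons, List.count_append]; push_cast; ring
      rw [if_neg hD, ih, hDe, hc]
      by_cases hE : rs.flatten.contains "D" = true
      · rw [if_pos hE, if_pos hE]
      · rw [if_neg hE, if_neg hE]
        by_cases h2 : (rs.flatten.count "@" : Int) > budget - (r.count "@" : Int)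
        · rw [if_pos h2, if_pos (by omega)]
        · rw [if_neg h2, if_neg (by omega)]

-- ===== VERDICT =====
theorem crap_spec : Claim_equal_crap := by
  intro garden bags cap _
  unfold Spec_crap crap crap_alt
  rw [crap_flat, crapGo_eq]
  simp
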